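-- pv_equiv track=rewrite | github.com/referandgetbot/ReferAndGetBot | bots.py | fancy
-- ===== SOURCE A (Python) =====
-- def fancy(text):
--     small_caps = {
--         'a': 'ᴀ', 'b': 'ʙ', 'c': 'ᴄ', 'd': 'ᴅ', 'e': 'ᴇ', 'f': 'ꜰ',
--         'g': 'ɢ', 'h': 'ʜ', 'i': 'ɪ', 'j': 'ᴊ', 'k': 'ᴋ', 'l': 'ʟ',
--         'm': 'ᴍ', 'n': 'ɴ', 'o': 'ᴏ', 'p': 'ᴘ', 'q': 'ǫ', 'r': 'ʀ',
--         's': 'ꜱ', 't': 'ᴛ', 'u': 'ᴜ', 'v': 'ᴠ', 'w': 'ᴡ', 'x': 'x',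
--         'y': 'ʏ', 'z': 'ᴢ'
--     }
--     words = text.lower().split()
--     fancy_words = []
--     for word in words:
--         if word:
--             first = word[0].upper()
--             rest = ''.join(small_caps.get(c, c) for c in word[1:])
--             fancy_words.append(first + rest)
--     return ' '.join(fancy_words)
-- ===== SOURCE B (Python) =====
-- def fancy(text):
--     TABLE = 'ᴀʙᴄᴅᴇꜰɢʜɪᴊᴋʟᴍɴᴏᴘǫʀꜱᴛᴜᴠᴡxʏᴢ'
--
--     def sc(c):
--         return TABLE[ord(c) - 97] if 'a' <= c <= 'z' else c
--
--     def go(s):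
--         s = s.lstrip()
--         if not s:
--             return ''
--         k = 1
--         while k < len(s) and not s[k].isspace():
--             k += 1
--         head = s[0].upper() + ''.join(sc(c) for c in s[1:k])
--         tail = go(s[k:])
--         return head + (' ' + tail if tail else '')
--
--     return go(text.lower())
-- ===== Notes on version B (the rewrite author's own statement) =====
-- stated objective: alternative
-- what changed: Replaces A's split()-into-words list, per-word dict lookups and final join by a recursive lstrip/take-word scan over the string that emits separators on the fly and maps letters through a 26-char table indexed by ord(c)-97 instead of a dict.
import Mathlib
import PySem

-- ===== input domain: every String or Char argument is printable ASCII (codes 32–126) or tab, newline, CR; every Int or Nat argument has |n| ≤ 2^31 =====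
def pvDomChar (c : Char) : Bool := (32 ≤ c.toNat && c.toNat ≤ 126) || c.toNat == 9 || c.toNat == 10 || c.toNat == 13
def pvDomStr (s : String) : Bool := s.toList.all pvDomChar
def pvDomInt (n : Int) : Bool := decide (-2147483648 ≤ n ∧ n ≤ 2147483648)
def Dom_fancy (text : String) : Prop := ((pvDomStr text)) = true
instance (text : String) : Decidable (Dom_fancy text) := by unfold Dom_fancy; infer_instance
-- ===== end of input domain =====

-- B replaces A's lower+split()+word-list loop and dict lookups by a recursive lstrip/take-word scan over the string with an offset-indexed small-caps table (alternative decomposition; equivalence of return values is what is proved).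


-- ===== PORT A =====
-- A's small_caps dict literal
def pvSmallCaps : PySem.Dict Char Char := PySem.Dict.ofList
  [('a','ᴀ'), ('b','ʙ'), ('c','ᴄ'), ('d','ᴅ'), ('e','ᴇ'), ('f','ꜰ'),
   ('g','ɢ'), ('h','ʜ'), ('i','ɪ'), ('j','ᴊ'), ('k','ᴋ'), ('l','ʟ'),
   ('m','ᴍ'), ('n','ɴ'), ('o','ᴏ'), ('p','ᴘ'), ('q','ǫ'), ('r','ʀ'),
   ('s','ꜱ'), ('t','ᴛ'), ('u','ᴜ'), ('v','ᴠ'), ('w','ᴡ'), ('x','x'),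
   ('y','ʏ'), ('z','ᴢ')]

-- small_caps.get(c, c)
def pvSC (c : Char) : Char := pvSmallCaps.getD c c

def fancy (text : String) : String :=
  let words := PySem.Chars.split₀ (PySem.Chars.lower text.toList)
  let fancyWords := words.foldl (fun acc word =>
    match word with
    | [] => acc                                     -- 'if word:' is false
    | c :: _ =>
      let first := PySem.Chars.upperChar c          -- word[0].upper()
      let rest := (PySem.List.slice word (some 1) none).map pvSC   -- ''.join(small_caps.get(c, c) for c in word[1:])
      acc ++ [first :: rest]) []
  String.ofList (PySem.Chars.join [' '] fancyWords)

-- ===== PORT B =====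
-- B's TABLE string, indexed by ord(c) - 97
def pvTable : List Char := "ᴀʙᴄᴅᴇꜰɢʜɪᴊᴋʟᴍɴᴏᴘǫʀꜱᴛᴜᴠᴡxʏᴢ".toList

-- sc(c) = TABLE[ord(c) - 97] if 'a' <= c <= 'z' else c
def scB (c : Char) : Char :=
  if 'a' ≤ c ∧ c ≤ 'z' then
    match PySem.List.pyGet? pvTable ((c.toNat : Int) - 97) with
    | some d => d
    | none => c        -- unreachable: the guard puts the index in range
  else c

-- go(s): lstrip, split off the first word (the while-k scan = takeWhile/dropWhile on not-space),
-- transform it, recurse on the remainder, join with ' ' only if the tail is nonempty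
def fancyGo (s : List Char) : List Char :=
  match h : s.dropWhile PySem.Chars.isspace with     -- s = s.lstrip(); if not s: return ''
  | [] => []
  | c :: rest =>
    let w := rest.takeWhile (fun d => !PySem.Chars.isspace d)        -- s[1:k]
    let head := PySem.Chars.upperChar c :: w.map scB                 -- s[0].upper() + ''.join(sc(c) …)
    let tail := fancyGo (rest.dropWhile (fun d => !PySem.Chars.isspace d))   -- go(s[k:])
    head ++ (if tail.isEmpty then [] else ' ' :: tail)
termination_by s.length
decreasing_by
  have h1 := List.length_dropWhile_le PySem.Chars.isspace s
  rw [h] at h1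
  have h2 := List.length_dropWhile_le (fun d => !PySem.Chars.isspace d) rest
  simp at h1
  omega

def fancy_alt (text : String) : String :=
  String.ofList (fancyGo (PySem.Chars.lower text.toList))

-- ===== PRECONDITION & SPEC =====
def Spec_fancy (text : String) (out : String) : Prop := out = fancy_alt text
instance (text : String) (out : String) : Decidable (Spec_fancy text out) := by unfold Spec_fancy; infer_instance

-- ===== CLAIM (what is proved, stated in full; the proofs are below) =====
def Claim_equal_fancy : Prop := ∀ (text : String), Dom_fancy text → Spec_fancy text (fancy text)

-- ===== LEMMAS AND PROOFS =====

-- reference rendering, a plain structural recursion over the char stream (proof-only)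
def pvSpec : List Char → Bool → List Char
  | [], _ => []
  | c :: rest, true =>
    if PySem.Chars.isspace c then pvSpec rest true
    else PySem.Chars.upperChar c :: pvSpec rest false
  | c :: rest, false =>
    if PySem.Chars.isspace c then
      (if (pvSpec rest true).isEmpty then [] else ' ' :: pvSpec rest true)
    else pvSC c :: pvSpec rest false

-- what A's loop body produces from one word
def pvTf : List Char → Option (List Char)
  | [] => none
  | c :: cs => some (PySem.Chars.upperChar c :: cs.map pvSC)

-- ' '.join over the transformed word list, recursively (proof-only)
def pvRender : List (List Char) → List Char
  | [] => []
  | [] :: ws => pvRender ws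
  | (c :: cs) :: ws =>
    (PySem.Chars.upperChar c :: cs.map pvSC) ++
      (if (pvRender ws).isEmpty then [] else ' ' :: pvRender ws)

theorem pvTf_nil : pvTf [] = none := rfl
theorem pvTf_cons (c : Char) (cs : List Char) :
    pvTf (c :: cs) = some (PySem.Chars.upperChar c :: cs.map pvSC) := rfl

theorem pvRender_nil_iff (ws : List (List Char)) :
    pvRender ws = [] ↔ ws.filterMap pvTf = [] := by
  induction ws with
  | nil => simp [pvRender]
  | cons w ws ih =>
    cases w with
    | nil => simpa [pvRender, pvTf_nil] using ih
    | cons c cs => simp [pvRender, pvTf_cons]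

theorem pv_intercalate_cons (s x : List Char) (xs : List (List Char)) :
    List.intercalate s (x :: xs) = x ++ (if xs.isEmpty then [] else s ++ List.intercalate s xs) := by
  cases xs with
  | nil => simp [List.intercalate]
  | cons y ys => simp [List.intercalate, List.intersperse]

theorem pv_join_eq_render (ws : List (List Char)) :
    PySem.Chars.join [' '] (ws.filterMap pvTf) = pvRender ws := by
  induction ws with
  | nil => simp [pvRender, PySem.Chars.join, List.intercalate]
  | cons w ws ih =>
    cases w with
    | nil => simpa [pvTf_nil, pvRender] using ih
    | cons c cs =>
      simp only [List.filterMap_cons, pvTf_cons, pvRender]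
      rw [PySem.Chars.join] at ih ⊢
      rw [pv_intercalate_cons]
      by_cases h : (ws.filterMap pvTf) = []
      · have : pvRender ws = [] := (pvRender_nil_iff ws).mpr h
        simp [h, this]
      · have h' : pvRender ws ≠ [] := fun hr => h ((pvRender_nil_iff ws).mp hr)
        simp [List.isEmpty_eq_false_iff.mpr h, List.isEmpty_eq_false_iff.mpr h', ih]

-- accumulator lemma for split₀.go
theorem pv_go_acc (s : List Char) : ∀ (cur : List Char) (wss : List (List Char)),
    PySem.Chars.split₀.go s cur wss = wss.reverse ++ PySem.Chars.split₀.go s cur [] := by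
  induction s with
  | nil =>
    intro cur wss
    by_cases h : cur.isEmpty <;> simp [PySem.Chars.split₀.go, h]
  | cons c rest ih =>
    intro cur wss
    simp only [PySem.Chars.split₀.go]
    by_cases hs : PySem.Chars.isspace c
    · by_cases hc : cur.isEmpty
      · simp only [hs, hc, if_true]
        rw [ih [] wss]
      · simp only [hs, hc, if_true]
        rw [ih [] (cur.reverse :: wss), ih [] [cur.reverse]]
        simp
    · simp only [hs]
      exact ih _ wss

-- transform of a word grown by one trailing char
theorem pv_tf_snoc (w : List Char) (c : Char) (hw : w ≠ []) :
    (pvTf (w ++ [c])).getD [] = (pvTf w).getD [] ++ [pvSC c] := by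
  cases w with
  | nil => exact absurd rfl hw
  | cons d ds => simp [pvTf]

-- A's word loop against the char-stream spec
theorem pv_a_main (s : List Char) :
    pvRender (PySem.Chars.split₀.go s [] []) = pvSpec s true ∧
    ∀ w : List Char, w ≠ [] →
      pvRender (PySem.Chars.split₀.go s w.reverse []) = (pvTf w).getD [] ++ pvSpec s false := by
  induction s with
  | nil =>
    refine ⟨by simp [PySem.Chars.split₀.go, pvRender, pvSpec], ?_⟩
    intro w hw
    cases w with
    | nil => exact absurd rfl hw
    | cons d ds => simp [PySem.Chars.split₀.go, pvRender, pvSpec, pvTf]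
  | cons c rest ih =>
    constructor
    · by_cases hs : PySem.Chars.isspace c
      · simpa [PySem.Chars.split₀.go, hs, pvSpec] using ih.1
      · have h2 := ih.2 [c] (by simp)
        simpa [PySem.Chars.split₀.go, hs, pvSpec, pvTf] using h2
    · intro w hw
      have hrev : w.reverse.isEmpty = false := by simpa using hw
      by_cases hs : PySem.Chars.isspace c
      · simp only [PySem.Chars.split₀.go, hs, hrev, if_true, if_false, Bool.false_eq_true]
        rw [pv_go_acc rest [] [w.reverse.reverse]]
        simp only [List.reverse_reverse, List.reverse_cons, List.reverse_nil, List.nil_append,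
          List.singleton_append]
        cases w with
        | nil => exact absurd rfl hw
        | cons d ds =>
          simp only [pvRender, pvSpec, hs, if_true, pvTf, Option.getD_some]
          rw [ih.1]
      · simp only [PySem.Chars.split₀.go, hs, if_false, Bool.false_eq_true]
        have : c :: w.reverse = (w ++ [c]).reverse := by simp
        rw [this, ih.2 (w ++ [c]) (by simp), pv_tf_snoc w c hw]
        simp [pvSpec, hs]

-- A's foldl accumulates exactly filterMap pvTf
theorem pv_foldl_tf (ws : List (List Char)) : ∀ acc : List (List Char),
    ws.foldl (fun acc word =>
      match word with
      | [] => acc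
      | c :: _ =>
        let first := PySem.Chars.upperChar c
        let rest := (PySem.List.slice word (some 1) none).map pvSC
        acc ++ [first :: rest]) acc = acc ++ ws.filterMap pvTf := by
  induction ws with
  | nil => intro acc; simp
  | cons w ws ih =>
    intro acc
    cases w with
    | nil => simpa [pvTf_nil] using ih acc
    | cons c cs =>
      simp only [List.foldl_cons, List.filterMap_cons, pvTf_cons]
      rw [ih, PySem.List.slice_from_one]
      simp

-- ===== B-side lemmas =====

theorem pv_char_le_iff (a c : Char) : (a ≤ c) ↔ a.toNat ≤ c.toNat := by
  rw [Char.le_def]; exact UInt32.le_iff_toNat_le ..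

-- B's indexed table agrees with A's dict on every char
theorem pv_scB_eq_pvSC (c : Char) : scB c = pvSC c := by
  by_cases h : 97 ≤ c.toNat ∧ c.toNat ≤ 122
  · obtain ⟨h1, h2⟩ := h
    obtain ⟨n, hn⟩ : ∃ n, c.toNat = n := ⟨_, rfl⟩
    have hc : c = Char.ofNat n := by rw [← hn, Char.ofNat_toNat]
    rw [hn] at h1 h2
    subst hc
    interval_cases n <;> decide
  · have hna : ¬('a' ≤ c ∧ c ≤ 'z') := by
      rw [pv_char_le_iff, pv_char_le_iff]; exact h
    have hnone : pvSmallCaps.get? c = none := by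
      rw [PySem.Dict.get?_eq_none_iff_not_mem_keys]
      intro hm
      have hk : pvSmallCaps.keys = ['a','b','c','d','e','f','g','h','i','j','k','l','m',
        'n','o','p','q','r','s','t','u','v','w','x','y','z'] := by decide
      rw [hk] at hm
      fin_cases hm <;> exact absurd (by decide) h
    rw [scB, if_neg hna, pvSC, PySem.Dict.getD_eq_get?_getD, hnone]
    rfl

-- pvSpec 'false' consumed over a run of non-space chars
theorem pv_spec_word (w : List Char) (r : List Char)
    (hw : ∀ d ∈ w, PySem.Chars.isspace d = false) :
    pvSpec (w ++ r) false = w.map pvSC ++ pvSpec r false := by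
  induction w with
  | nil => simp
  | cons d ds ih =>
    have hd := hw d (by simp)
    simp only [List.cons_append, pvSpec, hd, Bool.false_eq_true, if_false, List.map_cons,
      List.cons_append]
    rw [ih (fun e he => hw e (by simp [he]))]

-- pvSpec 'true' ignores leading whitespace
theorem pv_spec_dropWhile (s : List Char) :
    pvSpec (s.dropWhile PySem.Chars.isspace) true = pvSpec s true := by
  induction s with
  | nil => rfl
  | cons c rest ih =>
    by_cases hs : PySem.Chars.isspace c
    · simpa [hs, pvSpec] using ih
    · simp [hs, pvSpec]

-- at a word boundary (empty or space-headed remainder), 'false' state = separator + 'true' state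
theorem pv_spec_boundary (r : List Char)
    (hr : r = [] ∨ ∃ d r', r = d :: r' ∧ PySem.Chars.isspace d = true) :
    pvSpec r false = if (pvSpec r true).isEmpty then [] else ' ' :: pvSpec r true := by
  rcases hr with rfl | ⟨d, r', rfl, hd⟩
  · simp [pvSpec]
  · simp [pvSpec, hd]

-- the head of a nonempty dropWhile fails the predicate
theorem pv_dropWhile_head {p : Char → Bool} {l : List Char} {c : Char} {rest : List Char}
    (h : l.dropWhile p = c :: rest) : p c = false := by
  induction l with
  | nil => simp at h
  | cons a as ih =>
    rw [List.dropWhile_cons] at h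
    by_cases hp : p a
    · exact ih (by simpa [hp] using h)
    · obtain ⟨rfl, -⟩ : a = c ∧ as = rest := by simpa [hp] using h
      simpa using hp

-- B's recursion against the char-stream spec
theorem pv_b_main_aux (n : Nat) : ∀ (s : List Char), s.length ≤ n → fancyGo s = pvSpec s true := by
  induction n with
  | zero =>
    intro s hs
    have : s = [] := List.eq_nil_of_length_eq_zero (Nat.le_zero.mp hs)
    subst this
    rw [fancyGo]
    split
    · rfl
    · next heq => simp at heq
  | succ n ih =>
    intro s hs
    rw [fancyGo]
    rw [← pv_spec_dropWhile s]
    split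
    · next heq => rw [heq]; rfl
    · next c rest heq =>
      rw [heq]
      have hc : PySem.Chars.isspace c = false := pv_dropWhile_head heq
      have hlen : rest.length + 1 ≤ s.length := by
        have := List.length_dropWhile_le PySem.Chars.isspace s
        rw [heq] at this; simpa using this
      simp only [pvSpec, hc, Bool.false_eq_true, if_false]
      have hsplit : rest = rest.takeWhile (fun d => !PySem.Chars.isspace d) ++
          rest.dropWhile (fun d => !PySem.Chars.isspace d) :=
        (List.takeWhile_append_dropWhile).symm
      set w := rest.takeWhile (fun d => !PySem.Chars.isspace d) with hw
      set r := rest.dropWhile (fun d => !PySem.Chars.isspace d) with hr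
      have hwns : ∀ d ∈ w, PySem.Chars.isspace d = false := by
        intro d hd
        have := List.mem_takeWhile_imp hd
        simpa using this
      have hbnd : r = [] ∨ ∃ d r', r = d :: r' ∧ PySem.Chars.isspace d = true := by
        cases hrr : r with
        | nil => exact Or.inl rfl
        | cons d r' =>
          refine Or.inr ⟨d, r', rfl, ?_⟩
          have := pv_dropWhile_head (hr ▸ hrr : rest.dropWhile (fun d => !PySem.Chars.isspace d) = d :: r')
          simpa using this
      have hrlen : r.length ≤ n := by
        have h2 := List.length_dropWhile_le (fun d => !PySem.Chars.isspace d) rest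
        rw [← hr] at h2
        omega
      have htail : fancyGo r = pvSpec r true := ih r hrlen
      conv_rhs => rw [hsplit]
      rw [pv_spec_word w r hwns, pv_spec_boundary r hbnd, htail]
      simp [List.map_congr_left (fun d _ => pv_scB_eq_pvSC d)]

theorem pv_b_main (s : List Char) : fancyGo s = pvSpec s true :=
  pv_b_main_aux s.length s le_rfl

-- ===== VERDICT (by name: the statement is the Claim_ definition above) =====
theorem fancy_spec : Claim_equal_fancy := by
  intro text _
  unfold Spec_fancy fancy fancy_alt
  simp only [pv_foldl_tf, List.nil_append, PySem.Chars.split₀]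
  rw [pv_join_eq_render,
    (pv_a_main (PySem.Chars.lower text.toList)).1,
    pv_b_main (PySem.Chars.lower text.toList)]
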